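-- pv_equiv track=rewrite | github.com/Quingo/Quingo-runtime | src/quingo/lib/pyezQ.py | readout_data_to_state_probabilities
-- ===== SOURCE A (Python) =====
-- def readout_data_to_state_probabilities(result):
--     state01 = result.get("results")
--     basis_list = []
--     basis_content = "".join(
--         ["".join([str(s) for s in state]) for state in state01[1:]]
--     )
--     qubits_num = len(state01[0])  # 测量比特个数
--     for idx in range(qubits_num):
--         basis_result = basis_content[idx : len(basis_content) : qubits_num]
--         basis_list.append([True if res == "1" else False for res in basis_result])
--     return basis_list
-- ===== SOURCE B (Python) =====
-- def readout_data_to_state_probabilities(result):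
--     state01 = result.get("results")
--     qubits_num = len(state01[0])
--     if qubits_num == 0:
--         return []
--     cols = [[] for _ in range(qubits_num)]
--     pos = 0
--     for state in state01[1:]:
--         for s in state:
--             for ch in str(s):
--                 cols[pos % qubits_num].append(ch == "1")
--                 pos += 1
--     return cols
-- ===== Notes on version B (the rewrite author's own statement) =====
-- stated objective: alternative
-- what changed: Replaces A's build-one-flattened-string-then-gather-each-column-by-strided-slicing with a single round-robin scatter pass that appends each character's comparison into preallocated per-qubit columns.
import Mathlib
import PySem

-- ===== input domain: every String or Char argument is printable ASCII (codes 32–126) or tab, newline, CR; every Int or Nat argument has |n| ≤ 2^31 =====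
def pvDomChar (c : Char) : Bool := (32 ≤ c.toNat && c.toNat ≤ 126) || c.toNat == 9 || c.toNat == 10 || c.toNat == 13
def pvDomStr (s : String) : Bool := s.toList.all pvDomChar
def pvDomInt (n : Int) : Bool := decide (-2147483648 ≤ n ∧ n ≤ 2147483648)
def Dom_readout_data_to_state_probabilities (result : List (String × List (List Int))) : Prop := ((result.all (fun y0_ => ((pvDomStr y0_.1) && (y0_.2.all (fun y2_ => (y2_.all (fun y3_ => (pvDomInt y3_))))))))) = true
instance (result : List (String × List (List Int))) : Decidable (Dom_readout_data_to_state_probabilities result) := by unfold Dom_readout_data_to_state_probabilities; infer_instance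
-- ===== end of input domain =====

-- B replaces A's flattened-string + strided-slice gather by a single round-robin scatter
-- of the digit-character stream into preallocated columns (alternative decomposition, same cost).

-- ===== PORT A =====
def readout_data_to_state_probabilities (result : List (String × List (List Int))) : List (List Bool) :=
  match (PySem.Dict.ofList result).get? "results" with
  | none => []   -- Python raises TypeError (None[1:]); excluded by Pre_
  | some state01 =>
    let basis_content : List Char :=
      PySem.Chars.join [] ((PySem.List.slice state01 (some 1) none).map
        (fun state => PySem.Chars.join [] (state.map PySem.Int.toChars)))
    match state01 with
    | [] => []   -- Python raises IndexError (state01[0]); excluded by Pre_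
    | first :: _ =>
      let qubits_num := first.length
      (List.range qubits_num).foldl
        (fun basis_list (idx : Nat) =>
          let basis_result := (PySem.Chars.slice? basis_content (some (idx : Int))
              (some (basis_content.length : Int)) (qubits_num : Int)).getD []
          basis_list ++ [basis_result.map (fun res => res == '1')]) []

-- ===== PORT B =====
def readout_data_to_state_probabilities_alt (result : List (String × List (List Int))) : List (List Bool) :=
  match (PySem.Dict.ofList result).get? "results" with
  | none => []   -- Python raises AttributeError/TypeError; excluded by Pre_
  | some state01 =>
    match state01 with
    | [] => []   -- Python raises IndexError (state01[0]); excluded by Pre_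
    | first :: _ =>
      let qubits_num := first.length
      if qubits_num = 0 then [] else
      ((PySem.List.slice state01 (some 1) none).foldl
          (fun (st : List (List Bool) × Nat) state =>
            state.foldl
              (fun st s =>
                (PySem.Int.toChars s).foldl
                  (fun st ch =>
                    (st.1.set (st.2 % qubits_num)
                      ((st.1.getD (st.2 % qubits_num) []) ++ [ch == '1']), st.2 + 1))
                  st)
              st)
          (List.replicate qubits_num [], 0)).1

-- ===== PRECONDITION & SPEC =====
-- Pre_ excludes exactly the inputs where Python A raises: a missing "results" key
-- (TypeError on None) or an empty results list (IndexError on state01[0]).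
def Pre_readout_data_to_state_probabilities (result : List (String × List (List Int))) : Prop :=
  ((PySem.Dict.ofList result).get? "results").getD [] ≠ []
instance (result : List (String × List (List Int))) : Decidable (Pre_readout_data_to_state_probabilities result) := by unfold Pre_readout_data_to_state_probabilities; infer_instance
def pvWitness_readout_data_to_state_probabilities : (List (String × List (List Int))) :=
  [("results", [[0, 1], [1, 0], [0, 0]])]
def Spec_readout_data_to_state_probabilities (result : List (String × List (List Int))) (out : List (List Bool)) : Prop := out = readout_data_to_state_probabilities_alt result
instance (result : List (String × List (List Int))) (out : List (List Bool)) : Decidable (Spec_readout_data_to_state_probabilities result out) := by unfold Spec_readout_data_to_state_probabilities; infer_instance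

-- ===== CLAIM (what is proved, stated in full; the proofs are below) =====
def Claim_equal_readout_data_to_state_probabilities : Prop := ∀ (result : List (String × List (List Int))), Dom_readout_data_to_state_probabilities result → Pre_readout_data_to_state_probabilities result → Spec_readout_data_to_state_probabilities result (readout_data_to_state_probabilities result)

-- ===== LEMMAS AND PROOFS =====

-- every q-th character, starting at the head
def pvStride (q : Nat) : List Char → List Char
  | [] => []
  | c :: t => c :: pvStride q (t.drop (q - 1))
termination_by l => l.length
decreasing_by simp

-- B's loop step (definitionally the lambda in the port)
def pvStep (q : Nat) (st : List (List Bool) × Nat) (ch : Char) : List (List Bool) × Nat :=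
  (st.1.set (st.2 % q) ((st.1.getD (st.2 % q) []) ++ [ch == '1']), st.2 + 1)

-- distance from position pos to the next slot of column i (mod q), in closed form
def pvGap (q pos i : Nat) : Nat :=
  if pos % q ≤ i then i - pos % q else i + q - pos % q

theorem pvStride_range (q : Nat) (hq : 1 ≤ q) (cs : List Char) :
    pvStride q cs = (List.range ((cs.length + q - 1) / q)).filterMap (fun k => cs[q * k]?) := by
  induction cs using pvStride.induct q with
  | case1 =>
    simp [pvStride]
  | case2 c t ih =>
    have hcnt : (c :: t).length + q - 1 = t.length + q := by simp
    rw [show pvStride q (c :: t) = c :: pvStride q (t.drop (q - 1)) from by rw [pvStride], ih,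
      hcnt, Nat.add_div_right _ (by omega), List.range_succ_eq_map, List.filterMap_cons,
      List.filterMap_map]
    simp only [List.getElem?_cons_zero, Nat.mul_zero]
    have hc : ((t.drop (q - 1)).length + q - 1) / q = t.length / q := by
      rcases Nat.lt_or_ge t.length (q - 1) with h | h
      · rw [Nat.div_eq_of_lt (by simp; omega), Nat.div_eq_of_lt (by omega)]
      · have h2 : (t.drop (q - 1)).length + q - 1 = t.length := by simp; omega
        rw [h2]
    rw [hc]
    have hfun : (fun k => (t.drop (q - 1))[q * k]?) = ((fun k => (c :: t)[q * k]?) ∘ Nat.succ) := by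
      funext k
      simp only [Function.comp, List.getElem?_drop]
      have h2 : q * Nat.succ k = (q - 1 + q * k) + 1 := by
        have := Nat.mul_succ q k; omega
      rw [h2, List.getElem?_cons_succ]
    rw [hfun]

theorem pvSlice_stride (cs : List Char) (q idx : Nat) (hq : 1 ≤ q) :
    (PySem.Chars.slice? cs (some (idx : Int)) (some (cs.length : Int)) (q : Int)).getD []
      = pvStride q (cs.drop idx) := by
  have hq0 : ¬ ((q : Int) = 0) := by exact_mod_cast (by omega : ¬ (q = 0))
  have hqneg : ¬ ((q : Int) < 0) := by exact_mod_cast (by omega : ¬ ((q : Int) < 0))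
  have hidx : ¬ ((idx : Int) < 0) := by exact_mod_cast (by omega : ¬ ((idx : Int) < 0))
  have hlen : ¬ ((cs.length : Int) < 0) := by exact_mod_cast (by omega : ¬ ((cs.length : Int) < 0))
  have hqpos : (0 : Int) < (q : Int) := by exact_mod_cast (by omega : 0 < q)
  unfold PySem.Chars.slice? PySem.List.slice? PySem.List.sliceIndices
  rw [if_neg hq0]
  simp only [if_neg hqneg, if_neg hidx, if_neg hlen, if_pos hqpos, min_self, Option.getD_some]
  rcases Nat.lt_or_ge idx cs.length with hlt | hge
  · have hmin : min (idx : Int) (cs.length : Int) = (idx : Int) := by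
      rw [min_eq_left]; exact_mod_cast Nat.le_of_lt hlt
    rw [hmin, if_pos (show (idx : Int) < (cs.length : Int) from by exact_mod_cast hlt)]
    have hcnt : ((cs.length : Int) - (idx : Int) + (q : Int) - 1) = ((cs.length - idx + q - 1 : Nat) : Int) := by
      omega
    have hcnt2 : (((cs.length - idx + q - 1 : Nat) : Int) / (q : Int)).toNat
        = (cs.length - idx + q - 1) / q := by
      rw [← Int.natCast_div]; exact Int.toNat_natCast _
    rw [hcnt, hcnt2]
    have hfun : (fun x : Nat => cs[((idx : Int) + (q : Int) * (x : Int)).toNat]?)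
        = (fun x : Nat => (cs.drop idx)[q * x]?) := by
      funext x
      have h1 : ((idx : Int) + (q : Int) * (x : Int)) = ((idx + q * x : Nat) : Int) := by push_cast; ring
      rw [h1, Int.toNat_natCast, List.getElem?_drop]
    rw [hfun, pvStride_range q hq (cs.drop idx)]
    congr 2
    simp
  · have hmin : min (idx : Int) (cs.length : Int) = (cs.length : Int) := by
      rw [min_eq_right]; exact_mod_cast hge
    rw [hmin, if_neg (lt_irrefl _), List.drop_eq_nil_of_le hge]
    simp [pvStride]

theorem pvScatter_len (q : Nat) (cs : List Char) (st : List (List Bool) × Nat) :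
    (cs.foldl (pvStep q) st).1.length = st.1.length := by
  induction cs generalizing st with
  | nil => rfl
  | cons c t ih => simp [List.foldl_cons, ih, pvStep]

theorem pvSucc_mod (q pos : Nat) (hq : 1 ≤ q) :
    (pos + 1) % q = if pos % q + 1 = q then 0 else pos % q + 1 := by
  have h1 : (pos + 1) % q = (pos % q + 1 % q) % q := Nat.add_mod pos 1 q
  rcases Nat.lt_or_ge 1 q with h | h
  · have h2 : 1 % q = 1 := Nat.mod_eq_of_lt h
    rw [h1, h2]
    have hlt : pos % q < q := Nat.mod_lt _ (by omega)
    by_cases hcase : pos % q + 1 = q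
    · simp [hcase, Nat.mod_self]
    · rw [if_neg hcase, Nat.mod_eq_of_lt (by omega)]
  · interval_cases q
    simp [Nat.mod_one]

theorem pvGap_self (q pos : Nat) : pvGap q pos (pos % q) = 0 := by
  unfold pvGap; simp

theorem pvGap_succ_self (q pos : Nat) (hq : 1 ≤ q) : pvGap q (pos + 1) (pos % q) = q - 1 := by
  unfold pvGap
  rw [pvSucc_mod q pos hq]
  have h : pos % q < q := Nat.mod_lt _ (by omega)
  generalize pos % q = a at *
  split_ifs <;> omega

theorem pvGap_succ_ne (q pos i : Nat) (hq : 1 ≤ q) (hi : i < q) (hne : i ≠ pos % q) :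
    pvGap q pos i = pvGap q (pos + 1) i + 1 := by
  unfold pvGap
  rw [pvSucc_mod q pos hq]
  have h : pos % q < q := Nat.mod_lt _ (by omega)
  generalize pos % q = a at *
  split_ifs <;> omega

theorem pvScatter_getD (q : Nat) (hq : 1 ≤ q) (cs : List Char) :
    ∀ (cols : List (List Bool)) (pos : Nat), cols.length = q → ∀ i, i < q →
    ((cs.foldl (pvStep q) (cols, pos)).1).getD i []
      = cols.getD i [] ++ (pvStride q (cs.drop (pvGap q pos i))).map (fun c => c == '1') := by
  induction cs with
  | nil => intro cols pos hlen i hi; simp [pvStride]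
  | cons c t ih =>
    intro cols pos hlen i hi
    simp only [List.foldl_cons]
    have hstep : pvStep q (cols, pos) c
        = (cols.set (pos % q) ((cols.getD (pos % q) []) ++ [c == '1']), pos + 1) := rfl
    rw [hstep, ih _ _ (by simp [hlen]) i hi]
    have ha : pos % q < q := Nat.mod_lt _ (by omega)
    by_cases hia : i = pos % q
    · rw [hia, pvGap_self, pvGap_succ_self q pos hq]
      have hset : (cols.set (pos % q) ((cols.getD (pos % q) []) ++ [c == '1'])).getD (pos % q) []
          = (cols.getD (pos % q) []) ++ [c == '1'] := by
        simp [List.getD, hlen, ha]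
      rw [hset]
      simp [pvStride]
    · have hset : (cols.set (pos % q) ((cols.getD (pos % q) []) ++ [c == '1'])).getD i []
          = cols.getD i [] := by
        simp [List.getD, Ne.symm hia]
      rw [hset, pvGap_succ_ne q pos i hq hi hia, List.drop_succ_cons]

theorem pvFoldl_snoc {α β : Type} (g : α → β) (l : List α) (acc : List β) :
    l.foldl (fun acc idx => acc ++ [g idx]) acc = acc ++ l.map g := by
  induction l generalizing acc with
  | nil => simp
  | cons a t ih => simp [ih]

theorem pvJoin_nil (parts : List (List Char)) : PySem.Chars.join [] parts = parts.flatten := by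
  unfold PySem.Chars.join
  induction parts with
  | nil => rfl
  | cons a t ih =>
    cases t with
    | nil => simp [List.intercalate]
    | cons b t2 =>
      simp only [List.intercalate, List.intersperse] at *
      simp_all

theorem pvGap_zero (q i : Nat) : pvGap q 0 i = i := by
  unfold pvGap; simp

-- ===== VERDICT (by name: the statement is the Claim_ definition above) =====
theorem readout_data_to_state_probabilities_spec : Claim_equal_readout_data_to_state_probabilities := by
  intro result _ hpre
  unfold Pre_readout_data_to_state_probabilities at hpre
  unfold Spec_readout_data_to_state_probabilities
  unfold readout_data_to_state_probabilities readout_data_to_state_probabilities_alt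
  rcases hget : (PySem.Dict.ofList result).get? "results" with _ | state01
  · rfl
  · rw [hget] at hpre
    rcases state01 with _ | ⟨first, rest⟩
    · exact absurd rfl hpre
    · simp only [PySem.List.slice_from_one, List.tail_cons, pvJoin_nil]
      by_cases hq0 : first.length = 0
      · simp [hq0]
      · have hq : 1 ≤ first.length := by omega
        rw [if_neg hq0]
        set q := first.length with hqdef
        set cs := (rest.map (fun state => (state.map PySem.Int.toChars).flatten)).flatten with hcsdef
        have hs : ∀ idx : Nat, (PySem.Chars.slice? cs (some (idx : Int)) (some (cs.length : Int)) (q : Int)).getD [] = pvStride q (cs.drop idx) :=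
          fun idx => pvSlice_stride cs q idx hq
        have hA : (List.range q).foldl
            (fun basis_list (idx : Nat) =>
              basis_list ++ [((PySem.Chars.slice? cs (some (idx : Int)) (some (cs.length : Int)) (q : Int)).getD []).map (fun res => res == '1')]) []
            = (List.range q).map (fun idx => (pvStride q (cs.drop idx)).map (fun res => res == '1')) := by
          rw [pvFoldl_snoc]
          simp only [List.nil_append, hs]
        rw [hA]
        have hB : rest.foldl
            (fun st state => state.foldl (fun st s => (PySem.Int.toChars s).foldl (pvStep q) st) st)
            (List.replicate q [], 0) = cs.foldl (pvStep q) (List.replicate q [], 0) := by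
          rw [hcsdef]
          simp only [List.foldl_flatten, List.foldl_map]
        rw [show (List.foldl
            (fun st state =>
              List.foldl
                (fun st s =>
                  List.foldl
                    (fun st ch =>
                      (st.1.set (st.2 % q) (st.1.getD (st.2 % q) [] ++ [ch == '1']), st.2 + 1))
                    st (PySem.Int.toChars s))
                st state)
            (List.replicate q [], 0) rest)
          = rest.foldl (fun st state => state.foldl (fun st s => (PySem.Int.toChars s).foldl (pvStep q) st) st) (List.replicate q [], 0) from rfl, hB]
        have hlenB : (cs.foldl (pvStep q) (List.replicate q [], 0)).1.length = q := by
          rw [pvScatter_len]; simp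
        apply List.ext_getElem
        · simp [hlenB]
        · intro i h1 h2
          have hiq : i < q := by simpa using h1
          have hgetB : (cs.foldl (pvStep q) (List.replicate q [], 0)).1.getD i []
              = (List.replicate q ([] : List Bool)).getD i [] ++ (pvStride q (cs.drop (pvGap q 0 i))).map (fun c => c == '1') :=
            pvScatter_getD q hq cs (List.replicate q []) 0 (by simp) i hiq
          rw [List.getD_eq_getElem _ [] h2] at hgetB
          rw [hgetB]
          simp [pvGap_zero, hiq]
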